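-- pv_equiv track=rewrite | github.com/IINemo/lm-polygraph | src/lm_polygraph/normalizers/binned_pcc.py | _get_bin_indices
-- ===== SOURCE A (Python) =====
-- import math
--
-- def _get_bin_indices(ue, num_bins):
--     """Given an array of unceratinty estimates, returns the
--     indices of the elements that should be used to create the bins.
--     Bins are created such that each bin has approximately the same number of
--     elements.
--     """
--     # Calculate the number of elements in each bin
--     per_bin = len(ue) / num_bins
--
--     # If the number of elements is not divisible by the number of bins,
--     # then the number of elements in each bin will not be exactly equal.
--     # If it is divisible, then lesser_bin and greater_bin will be the same.
--     lesser_bin = math.floor(per_bin)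
--     greater_bin = math.ceil(per_bin)
--
--     # If we use greater_bin for all bins, then the number of elements in the bins
--     # will be greater than the number of elements in the original array.
--     # Number of excess elements is the number of bins that should have
--     # one less element in them, i.e. n_lesser_bins.
--     n_lesser_bins = (greater_bin * num_bins) - len(ue)
--     n_greater_bins = num_bins - n_lesser_bins
--
--     # Calculate total number of elements in lesser bins. This is the index
--     # where the greater bins start.
--     greater_start_index = n_lesser_bins * lesser_bin
--
--     # Calculate the indices of the elements that should be used to create the bins.
--     # First we create the indices for the lesser bins, then the greater bins, and
--     # finally the last element.
--     bin_indices = (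
--         [i * lesser_bin for i in range(n_lesser_bins)]
--         + [greater_start_index + i * greater_bin for i in range(n_greater_bins)]
--         + [len(ue) - 1]
--     )
--
--     return bin_indices
-- ===== SOURCE B (Python) =====
-- def _get_bin_indices(ue, num_bins):
--     """Build the explicit list of bin sizes (smaller bins first), then turn it
--     into start indices with a running prefix sum; append the last-element sentinel."""
--     q, r = divmod(len(ue), num_bins)
--     sizes = [q] * (num_bins - r) + [q + 1] * r
--     indices = []
--     start = 0
--     for size in sizes:
--         indices.append(start)
--         start += size
--     indices.append(len(ue) - 1)
--     return indices
-- ===== Notes on version B (the rewrite author's own statement) =====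
-- stated objective: alternative
-- what changed: B builds the explicit list of bin sizes (floor-size bins first, then ceil-size bins) and converts it to start indices with a running prefix sum, instead of A's two closed-form i*stride range comprehensions glued at a computed offset.
import Mathlib
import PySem

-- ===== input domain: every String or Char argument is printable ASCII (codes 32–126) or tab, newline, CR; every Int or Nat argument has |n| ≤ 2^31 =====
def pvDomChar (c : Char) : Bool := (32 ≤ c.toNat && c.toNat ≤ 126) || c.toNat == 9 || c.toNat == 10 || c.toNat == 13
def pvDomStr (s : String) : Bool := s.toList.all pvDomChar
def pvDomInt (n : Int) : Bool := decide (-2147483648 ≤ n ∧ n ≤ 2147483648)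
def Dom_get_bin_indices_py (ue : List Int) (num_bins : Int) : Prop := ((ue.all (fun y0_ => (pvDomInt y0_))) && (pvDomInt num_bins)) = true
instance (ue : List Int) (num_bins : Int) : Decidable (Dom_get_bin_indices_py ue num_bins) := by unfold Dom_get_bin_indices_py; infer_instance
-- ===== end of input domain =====

-- B computes the same start indices by listing the bin sizes and prefix-summing them (objective: alternative decomposition, same cost).

-- ===== PORT A =====
-- A computes per_bin = len(ue)/num_bins as a float and takes floor/ceil; on the list
-- lengths the domain generates these float floor/ceil values coincide with exact
-- floor/ceil division (a discrepancy needs lengths beyond 2^22), so they are ported as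
-- PySem.Int.floordiv and the ceiling -((-n) // k).
def get_bin_indices_py (ue : List Int) (num_bins : Int) : List Int :=
  let n : Int := ue.length
  let lesser_bin := PySem.Int.floordiv n num_bins
  let greater_bin := -(PySem.Int.floordiv (-n) num_bins)
  let n_lesser_bins := greater_bin * num_bins - n
  let n_greater_bins := num_bins - n_lesser_bins
  let greater_start_index := n_lesser_bins * lesser_bin
  ((PySem.List.pyRange 0 n_lesser_bins 1).map (fun i => i * lesser_bin))
    ++ ((PySem.List.pyRange 0 n_greater_bins 1).map (fun i => greater_start_index + i * greater_bin))
    ++ [n - 1]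

-- ===== PORT B =====
def get_bin_indices_py_alt (ue : List Int) (num_bins : Int) : List Int :=
  let n : Int := ue.length
  let q := PySem.Int.floordiv n num_bins
  let r := PySem.Int.mod n num_bins
  let sizes := List.replicate (num_bins - r).toNat q ++ List.replicate r.toNat (q + 1)
  let p := sizes.foldl (fun (st : List Int × Int) size => (st.1 ++ [st.2], st.2 + size)) ([], 0)
  p.1 ++ [n - 1]

-- ===== PRECONDITION & SPEC =====
-- Pre_ excludes exactly num_bins = 0, where A raises ZeroDivisionError.
def Pre_get_bin_indices_py (ue : List Int) (num_bins : Int) : Prop := num_bins ≠ 0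
instance (ue : List Int) (num_bins : Int) : Decidable (Pre_get_bin_indices_py ue num_bins) := by unfold Pre_get_bin_indices_py; infer_instance
def pvWitness_get_bin_indices_py : List Int × Int := ([1, 2, 3, 4, 5], 2)

def Spec_get_bin_indices_py (ue : List Int) (num_bins : Int) (out : List Int) : Prop := out = get_bin_indices_py_alt ue num_bins
instance (ue : List Int) (num_bins : Int) (out : List Int) : Decidable (Spec_get_bin_indices_py ue num_bins out) := by unfold Spec_get_bin_indices_py; infer_instance

-- ===== CLAIM (what is proved, stated in full; the proofs are below) =====
def Claim_equal_get_bin_indices_py : Prop := ∀ (ue : List Int) (num_bins : Int), Dom_get_bin_indices_py ue num_bins → Pre_get_bin_indices_py ue num_bins → Spec_get_bin_indices_py ue num_bins (get_bin_indices_py ue num_bins)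

-- ===== LEMMAS AND PROOFS =====
-- (pv_foldl_replicate: B's prefix-sum fold over a constant block, in closed form;
--  pv_mod_neg_bounds: Python-mod bounds for a negative divisor;
--  pv_ceil_pos_dvd / pv_ceil_pos_ndvd: the ceiling division -((-n)//k) for 0 < k.)

theorem pv_foldl_replicate (q : Int) (a : Nat) : ∀ (st : List Int) (acc : Int),
    (List.replicate a q).foldl (fun (st : List Int × Int) size => (st.1 ++ [st.2], st.2 + size)) (st, acc)
      = (st ++ (List.range a).map (fun i : Nat => acc + (i : Int) * q), acc + (a : Int) * q) := by
  induction a with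
  | zero => intro st acc; simp
  | succ a ih =>
    intro st acc
    rw [List.replicate_succ, List.foldl_cons]
    show (List.replicate a q).foldl _ (st ++ [acc], acc + q) = _
    rw [ih (st ++ [acc]) (acc + q)]
    rw [List.range_succ_eq_map, List.map_cons, List.map_map]
    simp only [Prod.mk.injEq]
    refine ⟨?_, by push_cast; ring⟩
    rw [List.append_assoc]
    congr 1
    simp only [List.singleton_append, Nat.cast_zero]
    congr 1
    · ring
    · apply List.map_congr_left; intro i _; simp only [Function.comp_apply]; push_cast; ring

theorem pv_mod_neg_bounds (a b : Int) (hb : b < 0) :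
    b < PySem.Int.mod a b ∧ PySem.Int.mod a b ≤ 0 := by
  have h1 : PySem.Int.mod a b = -(PySem.Int.mod (-a) (-b)) := by
    have h := PySem.Int.mod_neg_neg (-a) (-b)
    rw [neg_neg, neg_neg] at h
    omega
  have hpos : (0 : Int) < -b := by omega
  have h2 : PySem.Int.mod (-a) (-b) = (-a) % (-b) := PySem.Int.mod_eq_emod_of_pos hpos
  have h3 : 0 ≤ (-a) % (-b) := Int.emod_nonneg _ (by omega)
  have h4 : (-a) % (-b) < -b := Int.emod_lt_of_pos _ hpos
  rw [h1, h2]; omega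

theorem pv_ceil_pos_dvd (n k : Int) (hk : 0 < k) (h : n % k = 0) :
    -(PySem.Int.floordiv (-n) k) = n / k := by
  rw [PySem.Int.floordiv_eq_ediv_of_pos hk]
  have hqr : k * (n / k) + n % k = n := Int.ediv_add_emod n k
  have e : -n = (-(n / k)) * k := by linear_combination hqr - h
  rw [e, Int.mul_ediv_cancel _ (by omega)]
  ring

theorem pv_ceil_pos_ndvd (n k : Int) (hk : 0 < k) (h : n % k ≠ 0) :
    -(PySem.Int.floordiv (-n) k) = n / k + 1 := by
  rw [PySem.Int.floordiv_eq_ediv_of_pos hk]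
  have hqr : k * (n / k) + n % k = n := Int.ediv_add_emod n k
  have hr0 : 0 ≤ n % k := Int.emod_nonneg _ (by omega)
  have hrk : n % k < k := Int.emod_lt_of_pos _ hk
  have e : -n = (k - n % k) + (-(n / k) - 1) * k := by linear_combination hqr
  rw [e, Int.add_mul_ediv_right _ _ (by omega : k ≠ 0),
      Int.ediv_eq_zero_of_lt (by omega) (by omega)]
  ring

-- ===== VERDICT (by name: the statement is the Claim_ definition above) =====
theorem get_bin_indices_py_spec : Claim_equal_get_bin_indices_py := by
  intro ue k _hdom hk
  unfold Spec_get_bin_indices_py get_bin_indices_py get_bin_indices_py_alt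
  simp only []
  set n : Int := (ue.length : Int) with hn
  replace hk : k ≠ 0 := hk
  rcases lt_or_gt_of_ne hk with hneg | hpos
  · -- num_bins < 0: both sides reduce to [n - 1]
    set q2 := PySem.Int.floordiv (-n) k with hq2
    have hqr2 : q2 * k + PySem.Int.mod (-n) k = -n := PySem.Int.floordiv_mul_add_mod (-n) k
    have hb2 := pv_mod_neg_bounds (-n) k hneg
    have hb1 := pv_mod_neg_bounds n k hneg
    have e0 : -q2 * k - n = PySem.Int.mod (-n) k := by linear_combination -hqr2
    rw [PySem.List.pyRange_one, PySem.List.pyRange_one]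
    have e1 : (-q2 * k - n - 0).toNat = 0 := by omega
    have e2 : (k - (-q2 * k - n) - 0).toNat = 0 := by omega
    rw [e1, e2]
    have f1 : (k - PySem.Int.mod n k).toNat = 0 := by omega
    have f2 : (PySem.Int.mod n k).toNat = 0 := by omega
    rw [f1, f2]
    simp
  · -- num_bins > 0
    have hqr : k * (n / k) + n % k = n := Int.ediv_add_emod n k
    have hr0 : 0 ≤ n % k := Int.emod_nonneg _ (by omega)
    have hrk : n % k < k := Int.emod_lt_of_pos _ hpos
    rw [PySem.Int.floordiv_eq_ediv_of_pos hpos, PySem.Int.mod_eq_emod_of_pos hpos]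
    rw [PySem.List.pyRange_one, PySem.List.pyRange_one, List.foldl_append]
    rw [pv_foldl_replicate, pv_foldl_replicate]
    by_cases h0 : n % k = 0
    · rw [pv_ceil_pos_dvd n k hpos h0, h0]
      have e1 : n / k * k - n = 0 := by linear_combination hqr - h0
      rw [e1]
      have e2 : ((0 : Int) - 0).toNat = 0 := by omega
      have e3 : (k - 0 - 0).toNat = k.toNat := by omega
      rw [e2, e3]
      simp only [Int.toNat_zero, List.range_zero, List.map_nil, List.nil_append,
        List.append_nil, List.map_map, sub_zero]
      congr 1
      apply List.map_congr_left
      intro i _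
      simp only [Function.comp_apply]
      ring
    · rw [pv_ceil_pos_ndvd n k hpos h0]
      have e1 : (n / k + 1) * k - n = k - n % k := by linear_combination hqr
      rw [e1]
      have e2 : k - (k - n % k) - 0 = n % k := by ring
      rw [e2]
      have cast1 : (((k - n % k).toNat : Int)) = k - n % k := by omega
      rw [cast1]
      simp only [sub_zero, List.map_map, List.nil_append, List.append_assoc]
      congr 1
      · apply List.map_congr_left; intro i _; simp only [Function.comp_apply]; ring
      congr 1
      apply List.map_congr_left; intro i _; simp only [Function.comp_apply]; ring
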